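-- pv_equiv track=rewrite | github.com/ppkhang285/AI_BTL1 | test.py | find_start_number
-- ===== SOURCE A (Python) =====
-- def find_start_number(board, size):
--     """Finds the smallest absolute value number to start."""
--     start = None
--     number_list = []
--     for i in range(size):
--         for j in range(size):
--             if board[i][j] != 0:
--                 number_list.append((board[i][j], (i, j)))
--                 if start is None or abs(board[i][j]) < abs(start[0]):
--                     start = (board[i][j], (i, j))
--     return start, number_list
-- ===== SOURCE B (Python) =====
-- def find_start_number(board, size):
--     """Finds the smallest absolute value number to start."""
--     number_list = [(v, (i, j))
--                    for i, row in zip(range(size), board)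
--                    for j, v in zip(range(size), row)
--                    if v != 0]
--     order = sorted(number_list, key=lambda x: abs(x[0]))
--     start = order[0] if order else None
--     return start, number_list
-- ===== Notes on version B (the rewrite author's own statement) =====
-- stated objective: alternative
-- what changed: Replaces A's index-driven double loop with fused inline min-tracking by a zip(range,rows)-based structural traversal that never indexes the board, followed by a separate stable sort of the nonzero cells by absolute value whose head (first minimal element, matching A's strict-< tie-break) is the start.
import Mathlib
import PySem

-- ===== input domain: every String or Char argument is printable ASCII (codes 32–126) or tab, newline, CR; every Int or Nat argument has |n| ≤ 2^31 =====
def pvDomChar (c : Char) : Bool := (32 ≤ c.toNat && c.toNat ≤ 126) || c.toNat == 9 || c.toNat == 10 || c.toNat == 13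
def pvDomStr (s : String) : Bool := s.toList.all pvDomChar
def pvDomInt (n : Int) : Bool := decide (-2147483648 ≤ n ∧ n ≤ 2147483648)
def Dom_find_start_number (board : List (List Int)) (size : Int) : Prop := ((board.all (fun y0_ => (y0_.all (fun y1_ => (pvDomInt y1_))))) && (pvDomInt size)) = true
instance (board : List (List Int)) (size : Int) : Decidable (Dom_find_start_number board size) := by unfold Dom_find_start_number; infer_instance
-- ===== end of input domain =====

-- B replaces A's index loops with a zip-based structural traversal and A's fused running-min with a stable-sort-then-head selection (return value only; objective: alternative, same order of cost).


-- ===== PORT A =====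
-- board[i][j] is ported as pyGetD (defaults [] / 0): exact under Pre_, where both indices are in range.
def find_start_number (board : List (List Int)) (size : Int) : (Option (Int × (Int × Int))) × (List (Int × (Int × Int))) :=
  (PySem.List.pyRange 0 size 1).foldl (fun s i =>
    (PySem.List.pyRange 0 size 1).foldl (fun s j =>
      let v := PySem.List.pyGetD (PySem.List.pyGetD board i []) j 0
      if v ≠ 0 then
        let number_list := s.2 ++ [(v, (i, j))]
        let start : Option (Int × (Int × Int)) :=
          match s.1 with
          | none => some (v, (i, j))
          | some m => if |v| < |m.1| then some (v, (i, j)) else some m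
        (start, number_list)
      else s) s)
    ((none : Option (Int × (Int × Int))), ([] : List (Int × (Int × Int))))

-- ===== PORT B =====
-- zip(range(size), xs) is (pyRange 0 size 1).zip xs; the comprehension's per-cell 'keep if v ≠ 0' is the flatMap of a singleton-or-empty list.
def find_start_number_alt (board : List (List Int)) (size : Int) : (Option (Int × (Int × Int))) × (List (Int × (Int × Int))) :=
  let number_list : List (Int × (Int × Int)) :=
    ((PySem.List.pyRange 0 size 1).zip board).flatMap (fun p =>
      ((PySem.List.pyRange 0 size 1).zip p.2).flatMap (fun q =>
        if q.2 ≠ 0 then [(q.2, (p.1, q.1))] else []))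
  let order := PySem.List.sorted number_list (fun x => |x.1|) false
  let start : Option (Int × (Int × Int)) := match order with | [] => none | x :: _ => some x
  (start, number_list)

-- ===== PRECONDITION & SPEC =====
-- Pre_ excludes exactly the inputs where Python A raises IndexError: size rows must exist and each of the first size rows must have at least size entries.
def Pre_find_start_number (board : List (List Int)) (size : Int) : Prop :=
  size ≤ (board.length : Int) ∧ ∀ row ∈ board.take size.toNat, size ≤ (row.length : Int)
instance (board : List (List Int)) (size : Int) : Decidable (Pre_find_start_number board size) := by unfold Pre_find_start_number; infer_instance
def pvWitness_find_start_number : List (List Int) × Int := ([[1, 0], [-2, 3]], 2)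
def Spec_find_start_number (board : List (List Int)) (size : Int) (out : (Option (Int × (Int × Int))) × (List (Int × (Int × Int)))) : Prop := out = find_start_number_alt board size
instance (board : List (List Int)) (size : Int) (out : (Option (Int × (Int × Int))) × (List (Int × (Int × Int)))) : Decidable (Spec_find_start_number board size out) := by unfold Spec_find_start_number; infer_instance

-- ===== CLAIM (what is proved, stated in full; the proofs are below) =====
def Claim_equal_find_start_number : Prop := ∀ (board : List (List Int)) (size : Int), Dom_find_start_number board size → Pre_find_start_number board size → Spec_find_start_number board size (find_start_number board size)

-- ===== LEMMAS AND PROOFS =====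

-- A's min-update step (update on strict <, keep the older element on ties).
def pvMinStep (s : Option (Int × (Int × Int))) (p : Int × (Int × Int)) : Option (Int × (Int × Int)) :=
  match s with
  | none => some p
  | some m => if |p.1| < |m.1| then some p else some m

-- A's per-cell step on the paired state (start, number_list).
def pvStepA (s : (Option (Int × (Int × Int))) × (List (Int × (Int × Int)))) (p : Int × (Int × Int)) :
    (Option (Int × (Int × Int))) × (List (Int × (Int × Int))) :=
  if p.1 ≠ 0 then (pvMinStep s.1 p, s.2 ++ [p]) else s

-- The fused fold splits into a min-fold over the nonzero cells and the collected nonzero cells.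
theorem pvStepA_split (l : List (Int × (Int × Int))) (m : Option (Int × (Int × Int)))
    (acc : List (Int × (Int × Int))) :
    l.foldl pvStepA (m, acc) =
      ((l.filter (fun p => decide (p.1 ≠ 0))).foldl pvMinStep m,
       acc ++ l.filter (fun p => decide (p.1 ≠ 0))) := by
  induction l generalizing m acc with
  | nil => simp
  | cons p t ih =>
    by_cases h : p.1 ≠ 0
    · simp [pvStepA, h, ih]
    · simp [pvStepA, h, ih]

-- head of the stable insertion sort by |·| IS the running first-strict-min loop.
theorem pvHead_insertBy (b : Int × (Int × Int)) (acc : List (Int × (Int × Int))) :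
    (PySem.List.insertBy (fun a c => decide (|a.1| < |c.1|)) b acc).head? = pvMinStep acc.head? b := by
  cases acc with
  | nil => simp [PySem.List.insertBy, pvMinStep]
  | cons y t =>
    simp only [PySem.List.insertBy, pvMinStep]
    by_cases h : |b.1| < |y.1| <;> simp [h]

theorem pvHead_sorted_foldl (l : List (Int × (Int × Int))) (acc : List (Int × (Int × Int))) :
    (l.foldl (fun acc x => PySem.List.insertBy (fun a c => decide (|a.1| < |c.1|)) x acc) acc).head? =
      l.foldl pvMinStep acc.head? := by
  induction l generalizing acc with
  | nil => rfl
  | cons x t ih => rw [List.foldl_cons, List.foldl_cons, ih, pvHead_insertBy]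

theorem pvHead_sorted (l : List (Int × (Int × Int))) :
    (PySem.List.sorted l (fun x => |x.1|) false).head? = l.foldl pvMinStep none := by
  rw [PySem.List.sorted_eq_foldl_insertBy]
  exact pvHead_sorted_foldl l []

-- zip(range(n), xs) is position-value pairing, i.e. range(n) paired with xs[i], when n ≤ len(xs).
theorem pvZip_pyRange {α : Type} (xs : List α) (n : Int) (d : α) (h : n ≤ (xs.length : Int)) :
    (PySem.List.pyRange 0 n 1).zip xs =
      (PySem.List.pyRange 0 n 1).map (fun i => (i, PySem.List.pyGetD xs i d)) := by
  apply List.ext_getElem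
  · simp [PySem.List.length_pyRange_one]
    omega
  · intro k h1 h2
    have hk : k < n.toNat := by
      simpa [PySem.List.length_pyRange_one] using h2
    have hklen : k < xs.length := by omega
    have hr : (PySem.List.pyRange 0 n 1)[k]'(by simpa [PySem.List.length_pyRange_one] using hk) = (0 : Int) + k :=
      PySem.List.getElem_pyRange_one _ _ _ _
    simp only [List.getElem_zip, List.getElem_map, hr]
    congr 1
    rw [PySem.List.pyGetD_eq_getElem xs d (by omega) (by omega)]
    congr 1
    omega

-- a 'keep-if' comprehension over a mapped list = filter after map.
theorem pvFlatMap_if {α β : Type} (l : List α) (f : α → β) (c : β → Bool) :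
    l.flatMap (fun x => if c (f x) then [f x] else []) = (l.map f).filter c := by
  induction l with
  | nil => rfl
  | cons x t ih =>
    by_cases h : c (f x) <;> simp [h, ih]

-- ===== VERDICT (by name: the statement is the Claim_ definition above) =====
theorem find_start_number_spec : Claim_equal_find_start_number := by
  intro board size _ hpre
  obtain ⟨hlen, hrows⟩ := hpre
  unfold Spec_find_start_number find_start_number find_start_number_alt
  dsimp only
  -- A's inner fold over j, for a fixed i, is a fold of pvStepA over the mapped cell list.
  have hA : ∀ (l : List Int) (i : Int) (s : (Option (Int × (Int × Int))) × (List (Int × (Int × Int)))),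
      (PySem.List.pyRange 0 size 1).foldl (fun s j =>
        if PySem.List.pyGetD l j 0 ≠ 0 then
          (match s.1 with
            | none => some (PySem.List.pyGetD l j 0, (i, j))
            | some m => if |PySem.List.pyGetD l j 0| < |m.1| then some (PySem.List.pyGetD l j 0, (i, j)) else some m,
           s.2 ++ [(PySem.List.pyGetD l j 0, (i, j))])
        else s) s =
      ((PySem.List.pyRange 0 size 1).map (fun j => (PySem.List.pyGetD l j 0, (i, j)))).foldl pvStepA s := by
    intro l i s
    rw [List.foldl_map]
    rfl
  simp only [hA]
  rw [← List.foldl_flatMap, pvStepA_split]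
  -- name A's nonzero-cell list
  set cellsA := ((PySem.List.pyRange 0 size 1).flatMap
      (fun i => (PySem.List.pyRange 0 size 1).map (fun j => (PySem.List.pyGetD board i []) |> (fun row => (PySem.List.pyGetD row j 0, (i, j)))))).filter
      (fun p => decide (p.1 ≠ 0)) with hcells
  -- B's number_list equals cellsA
  have hB : ((PySem.List.pyRange 0 size 1).zip board).flatMap (fun p =>
      ((PySem.List.pyRange 0 size 1).zip p.2).flatMap (fun q =>
        if q.2 ≠ 0 then [(q.2, (p.1, q.1))] else [])) = cellsA := by
    rw [pvZip_pyRange board size [] hlen, List.flatMap_map]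
    rw [hcells, List.filter_flatMap]
    apply List.flatMap_congr
    intro i hi
    have hi' : 0 ≤ i ∧ i < size := (PySem.List.mem_pyRange_one).1 hi
    have hrow : size ≤ ((PySem.List.pyGetD board i []).length : Int) := by
      apply hrows
      rw [PySem.List.pyGetD_eq_getElem board [] hi'.1 (by omega)]
      have hlt : i.toNat < (board.take size.toNat).length := by simp; omega
      have hgt : (board.take size.toNat)[i.toNat] = board[i.toNat]'(by omega) := List.getElem_take
      rw [← hgt]
      exact List.getElem_mem hlt
    rw [pvZip_pyRange _ size 0 hrow, List.flatMap_map]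
    simpa using pvFlatMap_if (PySem.List.pyRange 0 size 1)
      (fun j => (PySem.List.pyGetD (PySem.List.pyGetD board i []) j 0, (i, j)))
      (fun p => decide (p.1 ≠ 0))
  rw [hB]
  -- both components agree
  have hhead : ∀ (l : List (Int × (Int × Int))),
      (match PySem.List.sorted l (fun x => |x.1|) false with | [] => none | x :: _ => some x) =
        l.foldl pvMinStep none := by
    intro l
    rw [← pvHead_sorted l]
    cases PySem.List.sorted l (fun x => |x.1|) false <;> rfl
  rw [hhead]
  simp
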